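-- pv_equiv track=rewrite | github.com/Nenavathnaresh/Python_DSA | DP-Problems/Medium/max-diff-of-0s-and-1s-in-binary-str.py | maxSubstring
-- ===== SOURCE A (Python) =====
-- def maxSubstring(S):
--     # Edge case: If the string contains only 1s, return -1
--     if '0' not in S:
--         return -1
--
--     # Initialize variables for Kadane's algorithm
--     max_so_far = float('-inf')
--     max_ending_here = 0
--
--     # Iterate over the binary string
--     for char in S:
--         # Treat '0' as +1 and '1' as -1
--         value = 1 if char == '0' else -1
--         max_ending_here += value
--
--         # If the sum is greater than the max so far, update max_so_far
--         max_so_far = max(max_so_far, max_ending_here)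
--
--         # If the current sum becomes negative, reset it to 0
--         if max_ending_here < 0:
--             max_ending_here = 0
--
--     return max_so_far
-- ===== SOURCE B (Python) =====
-- def maxSubstring(S):
--     # Edge case kept: a string without '0' has answer -1
--     if '0' not in S:
--         return -1
--     best = 0          # safe: a '0' exists, so the true answer is >= 1
--     total = 0         # running prefix sum (+1 for '0', -1 otherwise)
--     min_prefix = 0    # minimum prefix sum seen so far (empty prefix = 0)
--     for ch in S:
--         total += 1 if ch == '0' else -1
--         if total - min_prefix > best:
--             best = total - min_prefix
--         if total < min_prefix:
--             min_prefix = total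
--     return best
-- ===== Notes on version B (the rewrite author's own statement) =====
-- stated objective: alternative
-- what changed: Replaces Kadane's reset-on-negative accumulator (with a minus-infinity sentinel) by a prefix-sum/minimum-prefix formulation: best = max over positions of (prefix sum - earlier minimum prefix), needing no sentinel.
import Mathlib
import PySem

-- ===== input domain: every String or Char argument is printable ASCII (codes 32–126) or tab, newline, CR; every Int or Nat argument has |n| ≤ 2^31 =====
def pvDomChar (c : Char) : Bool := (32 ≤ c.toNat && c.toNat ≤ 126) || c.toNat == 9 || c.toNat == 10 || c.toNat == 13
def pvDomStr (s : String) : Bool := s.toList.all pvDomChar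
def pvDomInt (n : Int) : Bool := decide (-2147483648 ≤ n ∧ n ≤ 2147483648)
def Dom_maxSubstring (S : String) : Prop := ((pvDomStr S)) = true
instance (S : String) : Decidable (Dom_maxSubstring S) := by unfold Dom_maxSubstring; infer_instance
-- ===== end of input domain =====

-- B replaces Kadane's reset-on-negative scan by a prefix-sum / minimum-prefix scan (alternative decomposition, same O(n) cost).


-- ===== PORT A =====
-- Kadane step: max_so_far is Option Int (none stands for the minus-infinity sentinel before any char).
def pvStepA (st : Option Int × Int) (c : Char) : Option Int × Int :=
  let value : Int := if c = '0' then 1 else -1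
  let meh := st.2 + value
  let msf : Int := match st.1 with
    | none => meh
    | some m => max m meh
  (some msf, if meh < 0 then 0 else meh)

def maxSubstring (S : String) : Int :=
  if '0' ∈ S.toList then
    -- max_so_far is some _ on return (the loop ran at least once, since '0' ∈ S);
    -- the -1 default is unreachable.
    ((S.toList.foldl pvStepA (none, 0)).1).getD (-1)
  else
    -1

-- ===== PORT B =====
-- prefix-sum step over state (best, total, min_prefix)
def pvStepB (st : Int × Int × Int) (c : Char) : Int × Int × Int :=
  let total := st.2.1 + (if c = '0' then 1 else -1)
  let best := if total - st.2.2 > st.1 then total - st.2.2 else st.1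
  let minp := if total < st.2.2 then total else st.2.2
  (best, total, minp)

def maxSubstring_alt (S : String) : Int :=
  if '0' ∈ S.toList then
    (S.toList.foldl pvStepB (0, 0, 0)).1
  else
    -1

-- ===== PRECONDITION & SPEC =====
def Spec_maxSubstring (S : String) (out : Int) : Prop := out = maxSubstring_alt S
instance (S : String) (out : Int) : Decidable (Spec_maxSubstring S out) := by unfold Spec_maxSubstring; infer_instance

-- ===== CLAIM (what is proved, stated in full; the proofs are below) =====
def Claim_equal_maxSubstring : Prop := ∀ (S : String), Dom_maxSubstring S → Spec_maxSubstring S (maxSubstring S)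

-- ===== LEMMAS AND PROOFS =====

-- pure-Int version of A's step once max_so_far is some _
def pvStepA' (st : Int × Int) (c : Char) : Int × Int :=
  let value : Int := if c = '0' then 1 else -1
  let meh := st.2 + value
  (max st.1 meh, if meh < 0 then 0 else meh)

theorem foldA_some (xs : List Char) : ∀ (m meh : Int),
    xs.foldl pvStepA (some m, meh) =
      (some (xs.foldl pvStepA' (m, meh)).1, (xs.foldl pvStepA' (m, meh)).2) := by
  induction xs with
  | nil => intro m meh; simp [List.foldl]
  | cons c xs ih =>
    intro m meh
    simp only [List.foldl, pvStepA, pvStepA']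
    exact ih _ _

-- the fold result never drops below the initial max_so_far
theorem foldA'_mono (xs : List Char) : ∀ (m meh : Int),
    m ≤ (xs.foldl pvStepA' (m, meh)).1 := by
  induction xs with
  | nil => intro m meh; simp [List.foldl]
  | cons c xs ih =>
    intro m meh
    simp only [List.foldl, pvStepA']
    exact le_trans (le_max_left _ _) (ih _ _)

-- if a '0' remains and the running sum is nonnegative, the final max is ≥ 1
theorem foldA'_zero (xs : List Char) : ∀ (m meh : Int), 0 ≤ meh → '0' ∈ xs →
    1 ≤ (xs.foldl pvStepA' (m, meh)).1 := by
  induction xs with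
  | nil => intro m meh _ h; simp at h
  | cons c xs ih =>
    intro m meh hmeh hmem
    simp only [List.foldl, pvStepA']
    by_cases hc : c = '0'
    · subst hc
      have h1 : (1 : Int) ≤ max m (meh + 1) := le_trans (by omega) (le_max_right _ _)
      exact le_trans h1 (foldA'_mono xs _ _)
    · rcases List.mem_cons.mp hmem with h | h
      · exact absurd h.symm hc
      · exact ih _ _ (by simp [hc]; omega) h

-- core relation between B's fold and A's fold
theorem foldB_foldA' (xs : List Char) : ∀ (m t p : Int),
    (xs.foldl pvStepB (max 0 m, t, p)).1 = max 0 (xs.foldl pvStepA' (m, t - p)).1 := by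
  induction xs with
  | nil => intro m t p; simp [List.foldl]
  | cons c xs ih =>
    intro m t p
    simp only [List.foldl, pvStepB, pvStepA']
    set v : Int := if c = '0' then 1 else -1 with hv
    have hbest : (if t + v - p > max 0 m then t + v - p else max 0 m)
        = max 0 (max m (t - p + v)) := by omega
    have hst : (t + v, if t + v < p then t + v else p).1
        - (t + v, if t + v < p then t + v else p).2
        = (if t - p + v < 0 then 0 else t - p + v) := by
      simp only; omega
    rw [hbest]
    have := ih (max m (t - p + v)) (t + v) (if t + v < p then t + v else p)
    simpa [hst] using this

-- ===== VERDICT (by name: the statement is the Claim_ definition above) =====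
theorem maxSubstring_spec : Claim_equal_maxSubstring := by
  intro S _
  unfold Spec_maxSubstring maxSubstring maxSubstring_alt
  by_cases h : '0' ∈ S.toList
  · simp only [if_pos h]
    cases hxs : S.toList with
    | nil => rw [hxs] at h; simp at h
    | cons c xs =>
      rw [hxs] at h
      simp only [List.foldl, pvStepA, pvStepB]
      set v : Int := if c = '0' then 1 else -1 with hv
      rw [foldA_some]
      -- A's value after the whole fold
      set M := (xs.foldl pvStepA' ((0:Int) + v, if (0:Int) + v < 0 then 0 else 0 + v)).1 with hM
      have hM1 : 1 ≤ M := by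
        by_cases hc : c = '0'
        · have : (0:Int) + v = 1 := by simp [hv, hc]
          rw [hM, this]
          exact le_trans (by norm_num) (foldA'_mono xs 1 _)
        · have hvval : v = -1 := by simp [hv, hc]
          rcases List.mem_cons.mp h with h0 | h0
          · exact absurd h0.symm hc
          · exact foldA'_zero xs _ _ (by rw [hvval]; norm_num) h0
      have hB := foldB_foldA' xs ((0:Int) + v) ((0:Int) + v)
          (if (0:Int) + v < (0:Int) then (0:Int) + v else 0)
      have harg2 : (0:Int) + v - (if (0:Int) + v < (0:Int) then (0:Int) + v else 0)
          = (if (0:Int) + v < 0 then 0 else 0 + v) := by omega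
      have hbest0 : (if (0:Int) + v - 0 > 0 then (0:Int) + v - 0 else 0) = max 0 ((0:Int) + v) := by omega
      rw [hbest0] at *
      rw [harg2] at hB
      rw [← hM] at hB
      simp only [Option.getD_some]
      omega
  · simp [h]
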